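-- pv_equiv track=rewrite | github.com/Diana999/Graph_tasks | 2lablab.py | calculate
-- ===== SOURCE A (Python) =====
-- def calculate(p0, p1, max_len):
--     result = [p0, p1]
--     k = 0
--     for i in range(2, max_len+1):
--         result.append(0)
--         k = i+1
--         for j in range(0, i):
--             result[i] += k * result[j]
--             k -= 1
--     return result
-- ===== SOURCE B (Python) =====
-- def calculate(p0, p1, max_len):
--     # O(n): each new term is (i+1)*S - T where S = sum(result), T = sum(j*result[j]),
--     # maintained incrementally instead of re-scanning all previous terms.
--     result = [p0, p1]
--     s = p0 + p1
--     t = p1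
--     for i in range(2, max_len + 1):
--         v = (i + 1) * s - t
--         result.append(v)
--         s += v
--         t += i * v
--     return result
-- ===== Notes on version B (the rewrite author's own statement) =====
-- stated objective: faster
-- what changed: Replaces the inner rescan of all previous terms by two running accumulators S=sum(result) and T=sum(j*result[j]), so each new term is computed in O(1) as (i+1)*S-T.
import Mathlib
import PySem

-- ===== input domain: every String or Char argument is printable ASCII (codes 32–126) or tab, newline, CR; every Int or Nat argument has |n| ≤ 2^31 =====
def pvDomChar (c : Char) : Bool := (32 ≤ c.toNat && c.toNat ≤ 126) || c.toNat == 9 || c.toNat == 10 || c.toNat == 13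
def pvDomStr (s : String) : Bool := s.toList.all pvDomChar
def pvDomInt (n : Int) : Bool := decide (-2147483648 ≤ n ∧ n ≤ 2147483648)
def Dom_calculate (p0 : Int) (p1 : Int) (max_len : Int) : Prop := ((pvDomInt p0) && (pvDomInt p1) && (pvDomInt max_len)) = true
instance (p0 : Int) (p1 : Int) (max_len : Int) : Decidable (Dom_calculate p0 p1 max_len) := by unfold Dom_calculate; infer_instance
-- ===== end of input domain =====

-- B replaces the O(n^2) rescan of all previous terms by running sums S and T, computing each term as (i+1)*S-T in O(1).

-- ===== PORT A =====
-- inner loop body: result[i] += k * result[j]; k -= 1   (i, j always in range here)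
def calcInnerStep (i : Int) (st : List Int × Int) (j : Int) : List Int × Int :=
  (PySem.List.pySetD st.1 i (PySem.List.pyGetD st.1 i 0 + st.2 * PySem.List.pyGetD st.1 j 0), st.2 - 1)

-- outer loop body: result.append(0); k = i+1; for j in range(0, i): ...
def calcOuterStep (result : List Int) (i : Int) : List Int :=
  ((PySem.List.pyRange 0 i 1).foldl (calcInnerStep i) (result ++ [0], i + 1)).1

def calculate (p0 : Int) (p1 : Int) (max_len : Int) : List Int :=
  (PySem.List.pyRange 2 (max_len + 1) 1).foldl calcOuterStep [p0, p1]

-- ===== PORT B =====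
-- state (result, s, t): v = (i+1)*s - t; result.append(v); s += v; t += i*v
def calcAltStep (st : List Int × Int × Int) (i : Int) : List Int × Int × Int :=
  let v := (i + 1) * st.2.1 - st.2.2
  (st.1 ++ [v], st.2.1 + v, st.2.2 + i * v)

def calculate_alt (p0 : Int) (p1 : Int) (max_len : Int) : List Int :=
  ((PySem.List.pyRange 2 (max_len + 1) 1).foldl calcAltStep ([p0, p1], p0 + p1, p1)).1

-- ===== PRECONDITION & SPEC =====
def Spec_calculate (p0 : Int) (p1 : Int) (max_len : Int) (out : List Int) : Prop := out = calculate_alt p0 p1 max_len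
instance (p0 : Int) (p1 : Int) (max_len : Int) (out : List Int) : Decidable (Spec_calculate p0 p1 max_len out) := by unfold Spec_calculate; infer_instance

-- ===== CLAIM (what is proved, stated in full; the proofs are below) =====
def Claim_equal_calculate : Prop := ∀ (p0 : Int) (p1 : Int) (max_len : Int), Dom_calculate p0 p1 max_len → Spec_calculate p0 p1 max_len (calculate p0 p1 max_len)

-- ===== LEMMAS AND PROOFS =====

-- weighted sum Σ j * L[j], in the index-free recursive form wsum (x::M) = wsum M + sum M
def wsum : List Int → Int
  | [] => 0
  | _ :: M => wsum M + M.sum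

-- value accumulated by A's inner loop over the terms of M with decreasing weight starting at k
def wc (k : Int) : List Int → Int
  | [] => 0
  | x :: M => k * x + wc (k - 1) M

theorem wc_eq (k : Int) (L : List Int) : wc k L = k * L.sum - wsum L := by
  induction L generalizing k with
  | nil => simp [wc, wsum]
  | cons x M ih => simp [wc, wsum, ih (k - 1)]; ring

theorem wsum_append_singleton (L : List Int) (v : Int) :
    wsum (L ++ [v]) = wsum L + (L.length : Int) * v := by
  induction L with
  | nil => simp [wsum]
  | cons x M ih => simp [wsum, ih]; ring

theorem set_append_len {α : Type} (l : List α) (x v : α) :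
    (l ++ [x]).set l.length v = l ++ [v] := by
  induction l with
  | nil => simp
  | cons y l ih => simp [ih]

theorem inner_gen (M : List Int) : ∀ (pre : List Int) (x k : Int),
    ((List.range' pre.length M.length).map (fun t => ((t : Nat) : Int))).foldl
      (calcInnerStep (((pre ++ M).length : Nat) : Int)) ((pre ++ M) ++ [x], k)
    = ((pre ++ M) ++ [x + wc k M], k - M.length) := by
  induction M with
  | nil => intro pre x k; simp [wc]
  | cons y M ih =>
    intro pre x k
    simp only [List.length_cons]
    rw [List.range'_succ, List.map_cons, List.foldl_cons]
    have hget_j : PySem.List.pyGetD ((pre ++ y :: M) ++ [x]) ((pre.length : Nat) : Int) 0 = y := by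
      rw [PySem.List.pyGetD_natCast]
      rw [List.append_assoc]
      simp [List.getD_eq_getElem?_getD]
    have hget_i : PySem.List.pyGetD ((pre ++ y :: M) ++ [x]) (((pre ++ y :: M).length : Nat) : Int) 0 = x := by
      rw [PySem.List.pyGetD_natCast]
      simp [List.getD_eq_getElem?_getD]
    have hset : ∀ v : Int, PySem.List.pySetD ((pre ++ y :: M) ++ [x]) (((pre ++ y :: M).length : Nat) : Int) v
        = (pre ++ y :: M) ++ [v] := by
      intro v
      rw [PySem.List.pySetD_natCast, set_append_len]
    have hstep : calcInnerStep (((pre ++ y :: M).length : Nat) : Int) ((pre ++ y :: M) ++ [x], k) ((pre.length : Nat) : Int)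
        = ((pre ++ y :: M) ++ [x + k * y], k - 1) := by
      simp only [calcInnerStep, hget_j, hget_i, hset]
    rw [hstep]
    have hlen : pre.length + 1 = (pre ++ [y]).length := by simp
    have hE := ih (pre ++ [y]) (x + k * y) (k - 1)
    rw [show pre ++ [y] ++ M = pre ++ y :: M by simp] at hE
    rw [hlen, hE, show x + k * y + wc (k - 1) M = x + wc k (y :: M) from by simp [wc]; ring]
    simp only [Prod.mk.injEq]
    exact ⟨trivial, by omega⟩

theorem outer_one (L : List Int) :
    calcOuterStep L ((L.length : Nat) : Int) = L ++ [((L.length : Int) + 1) * L.sum - wsum L] := by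
  unfold calcOuterStep
  rw [PySem.List.pyRange_one]
  have h1 : ((L.length : Int) - 0).toNat = L.length := by simp
  have h2 : (List.range L.length).map (fun k : Nat => (0 : Int) + (k : Int))
      = (List.range' 0 L.length).map (fun t : Nat => ((t : Nat) : Int)) := by
    rw [List.range_eq_range']
    exact List.map_congr_left (fun k _ => by simp)
  rw [h1, h2]
  have h3 := inner_gen L [] 0 ((L.length : Int) + 1)
  simp only [List.nil_append, List.length_nil] at h3
  rw [h3, wc_eq]
  simp

theorem bstep_eq (L : List Int) :
    calcAltStep (L, L.sum, wsum L) ((L.length : Nat) : Int)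
      = (calcOuterStep L ((L.length : Nat) : Int),
         (calcOuterStep L ((L.length : Nat) : Int)).sum,
         wsum (calcOuterStep L ((L.length : Nat) : Int))) := by
  rw [outer_one]
  simp only [calcAltStep, wsum_append_singleton, List.sum_append, List.sum_cons, List.sum_nil]
  simp only [Prod.mk.injEq]
  exact ⟨trivial, by simp, trivial⟩

theorem outer_gen (n : Nat) : ∀ (L : List Int),
    ((List.range' L.length n).map (fun t => ((t : Nat) : Int))).foldl calcAltStep (L, L.sum, wsum L)
    = (((List.range' L.length n).map (fun t => ((t : Nat) : Int))).foldl calcOuterStep L,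
       (((List.range' L.length n).map (fun t => ((t : Nat) : Int))).foldl calcOuterStep L).sum,
       wsum (((List.range' L.length n).map (fun t => ((t : Nat) : Int))).foldl calcOuterStep L)) := by
  induction n with
  | zero => intro L; simp
  | succ n ih =>
    intro L
    rw [List.range'_succ, List.map_cons, List.foldl_cons, List.foldl_cons]
    rw [bstep_eq]
    have hlen : L.length + 1 = (calcOuterStep L ((L.length : Nat) : Int)).length := by
      rw [outer_one]; simp
    rw [hlen, ih]

theorem main_eq (p0 p1 max_len : Int) : calculate p0 p1 max_len = calculate_alt p0 p1 max_len := by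
  unfold calculate calculate_alt
  rw [PySem.List.pyRange_one]
  have h2 : (List.range (max_len + 1 - 2).toNat).map (fun k : Nat => (2 : Int) + (k : Int))
      = (List.range' 2 (max_len + 1 - 2).toNat).map (fun t : Nat => ((t : Nat) : Int)) := by
    rw [List.range'_eq_map_range, List.map_map]
    exact List.map_congr_left (fun k _ => by simp [Function.comp])
  rw [h2]
  have h3 := outer_gen (max_len + 1 - 2).toNat [p0, p1]
  simp only [show ([p0, p1] : List Int).length = 2 from rfl,
    show ([p0, p1] : List Int).sum = p0 + p1 by simp,
    show wsum [p0, p1] = p1 by simp [wsum]] at h3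
  rw [h3]

-- ===== VERDICT (by name: the statement is the Claim_ definition above) =====
theorem calculate_spec : Claim_equal_calculate := by
  intro p0 p1 max_len _
  unfold Spec_calculate
  exact main_eq p0 p1 max_len
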